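-- pv_equiv track=rewrite | github.com/zariuq/ai-agents | megalodon/ramsey36/gen_adj17_proofs.py | gen_recursive_vertex_step
-- ===== SOURCE A (Python) =====
-- adj = {
--     0: [9, 14, 15, 16],
--     1: [7, 11, 13, 16],
--     2: [8, 10, 12, 15],
--     3: [6, 8, 13, 15, 16],
--     4: [5, 7, 12, 14, 16],
--     5: [4, 9, 10, 11, 13],
--     6: [3, 10, 11, 12, 14],
--     7: [1, 4, 9, 10, 15],
--     8: [2, 3, 9, 11, 14],
--     9: [0, 5, 7, 8, 12],
--     10: [2, 5, 6, 7, 16],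
--     11: [1, 5, 6, 8, 15],
--     12: [2, 4, 6, 9, 13],
--     13: [1, 3, 5, 12, 14],
--     14: [0, 4, 6, 8, 13],
--     15: [0, 2, 3, 7, 11],
--     16: [0, 1, 3, 4, 10],
-- }
--
-- def gen_vertex_clause(v, i_var="i", j_var="j"):
--     """Generate the clause for a single vertex v."""
--     neighbors = adj[v]
--     neighbor_disj = r" \/ ".join(f"{j_var} = {n}" for n in neighbors)
--     return f"({i_var} = {v} /\\ ({neighbor_disj}))"
--
-- def gen_partial_def(vertices, i_var="i", j_var="j"):
--     """Generate the disjunction for a subset of vertices."""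
--     clauses = [gen_vertex_clause(v, i_var, j_var) for v in vertices]
--     return r" \/ ".join(clauses)
--
-- def indent(text, prefix="  "):
--     """Indent a block of text."""
--     return "\n".join(prefix + line for line in text.splitlines())
--
-- def gen_recursive_neighbor_step(neighbors, v, hyp_name, i_var, j_var):
--     """Recursively generate proof steps for neighbor disjunction."""
--     lines = []
--     left_subset = neighbors[:-1]
--     left_pat = r" \/ ".join(f"{j_var} = {n}" for n in left_subset)
--     lines.append(f"- assume HL: {left_pat}.")
--     if len(left_subset) > 1:
--         lines.append(f"  apply HL.")
--         lines.append(indent(gen_recursive_neighbor_step(left_subset, v, "HL", i_var, j_var), "  "))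
--     else:
--         n = left_subset[0]
--         lines.append(f"  rewrite H{i_var}. rewrite HL.")
--         lines.append(f"  exact Adj17_{n}_{v}.")
--     right_n = neighbors[-1]
--     lines.append(f"- assume HR: {j_var} = {right_n}.")
--     lines.append(f"  rewrite H{i_var}. rewrite HR.")
--     lines.append(f"  exact Adj17_{right_n}_{v}.")
--     return "\n".join(lines)
--
-- def gen_vertex_case_body(v, hyp_name, i_var, j_var):
--     """Generate the body of the proof for a specific vertex case."""
--     lines = []
--     lines.append(f"apply {hyp_name}.")
--     lines.append(f"assume H{i_var}: {i_var} = {v}.")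
--     neighbor_disj = r" \/ ".join(f"{j_var} = {n}" for n in adj[v])
--     lines.append(f"assume H_neighbors: {neighbor_disj}.")
--     lines.append(f"apply H_neighbors.")
--     lines.append(gen_recursive_neighbor_step(adj[v], v, "H_neighbors", i_var, j_var))
--     return "\n".join(lines)
--
-- def gen_recursive_vertex_step(vertices, i_var, j_var):
--     """Recursively generate proof steps for vertex disjunction."""
--     k = vertices[-1]
--     left_subset = vertices[:-1]
--     lines = []
--     left_def = gen_partial_def(left_subset, i_var, j_var)
--     lines.append(f"- assume HL: {left_def}.")
--     if len(left_subset) > 1: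
--         lines.append(f"  apply HL.")
--         lines.append(indent(gen_recursive_vertex_step(left_subset, i_var, j_var), "  "))
--     else:
--         lines.append(indent(gen_vertex_case_body(left_subset[0], "HL", i_var, j_var), "  "))
--     right_def = gen_vertex_clause(k, i_var, j_var)
--     lines.append(f"- assume HR: {right_def}.")
--     lines.append(indent(gen_vertex_case_body(k, "HR", i_var, j_var), "  "))
--     return "\n".join(lines)
-- ===== SOURCE B (Python) =====
-- # Iterative inside-out construction of the nested proof text (no recursion):
-- # build the innermost two-vertex block, then wrap it once per further vertex.
-- adj = {
--     0: [9, 14, 15, 16],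
--     1: [7, 11, 13, 16],
--     2: [8, 10, 12, 15],
--     3: [6, 8, 13, 15, 16],
--     4: [5, 7, 12, 14, 16],
--     5: [4, 9, 10, 11, 13],
--     6: [3, 10, 11, 12, 14],
--     7: [1, 4, 9, 10, 15],
--     8: [2, 3, 9, 11, 14],
--     9: [0, 5, 7, 8, 12],
--     10: [2, 5, 6, 7, 16],
--     11: [1, 5, 6, 8, 15],
--     12: [2, 4, 6, 9, 13],
--     13: [1, 3, 5, 12, 14],
--     14: [0, 4, 6, 8, 13],
--     15: [0, 2, 3, 7, 11],
--     16: [0, 1, 3, 4, 10],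
-- }
--
-- def gen_vertex_clause(v, i_var="i", j_var="j"):
--     neighbor_disj = r" \/ ".join(f"{j_var} = {n}" for n in adj[v])
--     return f"({i_var} = {v} /\\ ({neighbor_disj}))"
--
-- def gen_partial_def(vertices, i_var="i", j_var="j"):
--     return r" \/ ".join(gen_vertex_clause(v, i_var, j_var) for v in vertices)
--
-- def indent(text, prefix="  "):
--     return "\n".join(prefix + line for line in text.splitlines())
--
-- def gen_recursive_neighbor_step(neighbors, v, hyp_name, i_var, j_var):
--     def leaf(h, n):
--         return (f"- assume {h}: {j_var} = {n}.\n"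
--                 f"  rewrite H{i_var}. rewrite {h}.\n"
--                 f"  exact Adj17_{n}_{v}.")
--     result = leaf("HL", neighbors[0]) + "\n" + leaf("HR", neighbors[1])
--     for idx in range(2, len(neighbors)):
--         left_pat = r" \/ ".join(f"{j_var} = {n}" for n in neighbors[:idx])
--         result = (f"- assume HL: {left_pat}.\n  apply HL.\n"
--                   + indent(result)
--                   + "\n" + leaf("HR", neighbors[idx]))
--     return result
--
-- def gen_vertex_case_body(v, hyp_name, i_var, j_var):
--     disj = r" \/ ".join(f"{j_var} = {n}" for n in adj[v])
--     return (f"apply {hyp_name}.\n"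
--             f"assume H{i_var}: {i_var} = {v}.\n"
--             f"assume H_neighbors: {disj}.\n"
--             "apply H_neighbors.\n"
--             + gen_recursive_neighbor_step(adj[v], v, "H_neighbors", i_var, j_var))
--
-- def gen_recursive_vertex_step(vertices, i_var, j_var):
--     v0, v1 = vertices[0], vertices[1]
--     result = ("- assume HL: " + gen_vertex_clause(v0, i_var, j_var) + ".\n"
--               + indent(gen_vertex_case_body(v0, "HL", i_var, j_var))
--               + "\n- assume HR: " + gen_vertex_clause(v1, i_var, j_var) + ".\n"
--               + indent(gen_vertex_case_body(v1, "HR", i_var, j_var)))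
--     for idx in range(2, len(vertices)):
--         result = ("- assume HL: " + gen_partial_def(vertices[:idx], i_var, j_var) + ".\n"
--                   + "  apply HL.\n"
--                   + indent(result)
--                   + "\n- assume HR: " + gen_vertex_clause(vertices[idx], i_var, j_var) + ".\n"
--                   + indent(gen_vertex_case_body(vertices[idx], "HR", i_var, j_var)))
--     return result
-- ===== Notes on version B (the rewrite author's own statement) =====
-- stated objective: alternative
-- what changed: B builds the nested proof text iteratively from the inside out (innermost two-vertex block first, then one wrapping step per further vertex, likewise for the neighbor disjunction) with a single accumulated string, instead of A's top-down recursion that joins per-call line lists.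
import Mathlib
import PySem

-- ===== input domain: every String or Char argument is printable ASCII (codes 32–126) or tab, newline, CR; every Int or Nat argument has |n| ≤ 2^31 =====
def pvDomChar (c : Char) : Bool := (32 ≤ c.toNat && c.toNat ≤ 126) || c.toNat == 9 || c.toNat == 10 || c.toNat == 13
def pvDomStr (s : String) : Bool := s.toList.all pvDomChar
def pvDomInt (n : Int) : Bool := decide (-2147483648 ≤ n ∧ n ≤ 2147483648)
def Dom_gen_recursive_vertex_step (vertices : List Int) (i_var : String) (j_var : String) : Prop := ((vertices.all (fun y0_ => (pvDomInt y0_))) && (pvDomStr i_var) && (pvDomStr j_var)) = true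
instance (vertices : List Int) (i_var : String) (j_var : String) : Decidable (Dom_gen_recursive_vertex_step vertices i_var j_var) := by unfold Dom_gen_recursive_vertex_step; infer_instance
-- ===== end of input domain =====

-- B builds the nested proof text iteratively from the inside out (innermost two-vertex
-- block first, then one wrapping step per further vertex; likewise for the neighbor
-- disjunction) with one accumulated string, instead of A's top-down recursion.

-- ===== shared module helpers (identical code in both Python files) =====

-- the module-level 'adj' dict
def pvAdj : PySem.Dict Int (List Int) :=
  PySem.Dict.ofList
    [(0,[9,14,15,16]), (1,[7,11,13,16]), (2,[8,10,12,15]), (3,[6,8,13,15,16]),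
     (4,[5,7,12,14,16]), (5,[4,9,10,11,13]), (6,[3,10,11,12,14]), (7,[1,4,9,10,15]),
     (8,[2,3,9,11,14]), (9,[0,5,7,8,12]), (10,[2,5,6,7,16]), (11,[1,5,6,8,15]),
     (12,[2,4,6,9,13]), (13,[1,3,5,12,14]), (14,[0,4,6,8,13]), (15,[0,2,3,7,11]),
     (16,[0,1,3,4,10])]

-- adj[v]; the KeyError case (v not a key) is excluded by Pre_
def adjGet (v : Int) : List Int := PySem.Dict.getD pvAdj v []

-- r" \/ ".join(f"{j_var} = {n}" for n in ns)
def disjOf (j_var : String) (ns : List Int) : String :=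
  PySem.Str.join " \\/ " (ns.map (fun n => j_var ++ " = " ++ PySem.Int.toStr n))

-- gen_vertex_clause
def genVertexClause (v : Int) (i_var j_var : String) : String :=
  "(" ++ i_var ++ " = " ++ PySem.Int.toStr v ++ " /\\ (" ++ disjOf j_var (adjGet v) ++ "))"

-- gen_partial_def
def genPartialDef (vs : List Int) (i_var j_var : String) : String :=
  PySem.Str.join " \\/ " (vs.map (fun v => genVertexClause v i_var j_var))

-- indent (both Pythons only ever use the default prefix "  ")
def indentS (text : String) : String :=
  PySem.Str.join "\n" ((PySem.Str.splitlines text).map (fun l => "  " ++ l))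

-- ===== PORT A =====

-- gen_recursive_neighbor_step (A): recursion dropping the last neighbor
-- (neighbors[:-1] is dropLast; neighbors[-1] / left[0] raise IndexError only outside Pre_)
def genRecNeighborA (neighbors : List Int) (v : Int) (hyp_name : String) (i_var j_var : String) : String :=
  PySem.Str.join "\n"
    (["- assume HL: " ++ disjOf j_var neighbors.dropLast ++ "."] ++
     (if h : 1 < neighbors.dropLast.length then
        ["  apply HL.", indentS (genRecNeighborA neighbors.dropLast v "HL" i_var j_var)]
      else
        ["  rewrite H" ++ i_var ++ ". rewrite HL.",
         "  exact Adj17_" ++ PySem.Int.toStr (neighbors.dropLast.headD 0) ++ "_" ++ PySem.Int.toStr v ++ "."]) ++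
     ["- assume HR: " ++ j_var ++ " = " ++ PySem.Int.toStr ((PySem.List.pyGet? neighbors (-1)).getD 0) ++ ".",
      "  rewrite H" ++ i_var ++ ". rewrite HR.",
      "  exact Adj17_" ++ PySem.Int.toStr ((PySem.List.pyGet? neighbors (-1)).getD 0) ++ "_" ++ PySem.Int.toStr v ++ "."])
termination_by neighbors.length
decreasing_by simp only [List.length_dropLast] at *; omega

-- gen_vertex_case_body (A)
def genCaseBodyA (v : Int) (hyp_name : String) (i_var j_var : String) : String :=
  PySem.Str.join "\n"
    ["apply " ++ hyp_name ++ ".",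
     "assume H" ++ i_var ++ ": " ++ i_var ++ " = " ++ PySem.Int.toStr v ++ ".",
     "assume H_neighbors: " ++ disjOf j_var (adjGet v) ++ ".",
     "apply H_neighbors.",
     genRecNeighborA (adjGet v) v "H_neighbors" i_var j_var]

-- gen_recursive_vertex_step (A): recursion dropping the last vertex
def gen_recursive_vertex_step (vertices : List Int) (i_var : String) (j_var : String) : String :=
  PySem.Str.join "\n"
    (["- assume HL: " ++ genPartialDef vertices.dropLast i_var j_var ++ "."] ++
     (if h : 1 < vertices.dropLast.length then
        ["  apply HL.", indentS (gen_recursive_vertex_step vertices.dropLast i_var j_var)]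
      else
        [indentS (genCaseBodyA (vertices.dropLast.headD 0) "HL" i_var j_var)]) ++
     ["- assume HR: " ++ genVertexClause ((PySem.List.pyGet? vertices (-1)).getD 0) i_var j_var ++ ".",
      indentS (genCaseBodyA ((PySem.List.pyGet? vertices (-1)).getD 0) "HR" i_var j_var)])
termination_by vertices.length
decreasing_by simp only [List.length_dropLast] at *; omega

-- ===== PORT B =====

-- the local 'leaf' helper of B's gen_recursive_neighbor_step
def leafB (h : String) (n v : Int) (i_var j_var : String) : String :=
  "- assume " ++ h ++ ": " ++ j_var ++ " = " ++ PySem.Int.toStr n ++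
  ".\n  rewrite H" ++ i_var ++ ". rewrite " ++ h ++
  ".\n  exact Adj17_" ++ PySem.Int.toStr n ++ "_" ++ PySem.Int.toStr v ++ "."

-- gen_recursive_neighbor_step (B): iterative, inside out
-- (neighbors[0]/neighbors[1] raise IndexError only outside Pre_)
def genRecNeighborB (neighbors : List Int) (v : Int) (hyp_name : String) (i_var j_var : String) : String :=
  (PySem.List.pyRange 2 (PySem.List.len neighbors)).foldl
    (fun result idx =>
      "- assume HL: " ++ disjOf j_var (PySem.List.slice neighbors none (some idx)) ++
      ".\n  apply HL.\n" ++ indentS result ++ "\n" ++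
      leafB "HR" ((PySem.List.pyGet? neighbors idx).getD 0) v i_var j_var)
    (leafB "HL" (neighbors.headD 0) v i_var j_var ++ "\n" ++
     leafB "HR" (PySem.List.pyGetD neighbors 1 0) v i_var j_var)

-- gen_vertex_case_body (B): direct concatenation
def genCaseBodyB (v : Int) (hyp_name : String) (i_var j_var : String) : String :=
  "apply " ++ hyp_name ++ ".\nassume H" ++ i_var ++ ": " ++ i_var ++ " = " ++
  PySem.Int.toStr v ++ ".\nassume H_neighbors: " ++ disjOf j_var (adjGet v) ++
  ".\napply H_neighbors.\n" ++ genRecNeighborB (adjGet v) v "H_neighbors" i_var j_var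

-- gen_recursive_vertex_step (B): iterative, inside out
-- (vertices[0]/vertices[1] raise IndexError only outside Pre_)
def gen_recursive_vertex_step_alt (vertices : List Int) (i_var : String) (j_var : String) : String :=
  (PySem.List.pyRange 2 (PySem.List.len vertices)).foldl
    (fun result idx =>
      "- assume HL: " ++ genPartialDef (PySem.List.slice vertices none (some idx)) i_var j_var ++
      ".\n" ++ "  apply HL.\n" ++ indentS result ++
      "\n- assume HR: " ++ genVertexClause ((PySem.List.pyGet? vertices idx).getD 0) i_var j_var ++ ".\n" ++
      indentS (genCaseBodyB ((PySem.List.pyGet? vertices idx).getD 0) "HR" i_var j_var))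
    ("- assume HL: " ++ genVertexClause (vertices.headD 0) i_var j_var ++ ".\n" ++
     indentS (genCaseBodyB (vertices.headD 0) "HL" i_var j_var) ++
     "\n- assume HR: " ++ genVertexClause (PySem.List.pyGetD vertices 1 0) i_var j_var ++ ".\n" ++
     indentS (genCaseBodyB (PySem.List.pyGetD vertices 1 0) "HR" i_var j_var))

-- ===== PRECONDITION & SPEC =====

-- Pre_ excludes exactly the raising inputs: fewer than two vertices (IndexError on
-- vertices[-1]/left[0] in A and on vertices[0]/vertices[1] in B) and any vertex outside
-- adj's keys 0..16 (KeyError on adj[v] in both).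
def Pre_gen_recursive_vertex_step (vertices : List Int) (i_var : String) (j_var : String) : Prop :=
  2 ≤ vertices.length ∧ ∀ v ∈ vertices, 0 ≤ v ∧ v < 17

instance (vertices : List Int) (i_var : String) (j_var : String) : Decidable (Pre_gen_recursive_vertex_step vertices i_var j_var) := by
  unfold Pre_gen_recursive_vertex_step; infer_instance

def pvWitness_gen_recursive_vertex_step : List Int × String × String := ([0, 1], "i", "j")

def Spec_gen_recursive_vertex_step (vertices : List Int) (i_var : String) (j_var : String) (out : String) : Prop := out = gen_recursive_vertex_step_alt vertices i_var j_var
instance (vertices : List Int) (i_var : String) (j_var : String) (out : String) : Decidable (Spec_gen_recursive_vertex_step vertices i_var j_var out) := by unfold Spec_gen_recursive_vertex_step; infer_instance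

-- ===== CLAIM (what is proved, stated in full; the proofs are below) =====
def Claim_equal_gen_recursive_vertex_step : Prop := ∀ (vertices : List Int) (i_var : String) (j_var : String), Dom_gen_recursive_vertex_step vertices i_var j_var → Pre_gen_recursive_vertex_step vertices i_var j_var → Spec_gen_recursive_vertex_step vertices i_var j_var (gen_recursive_vertex_step vertices i_var j_var)

-- ===== LEMMAS AND PROOFS =====

-- str.join on a two-or-more-element list peels one separator
lemma sjoin_cc (s a b : String) (t : List String) :
    PySem.Str.join s (a :: b :: t) = a ++ (s ++ PySem.Str.join s (b :: t)) := by
  rw [← String.toList_inj]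
  simp [PySem.Str.join, PySem.Chars.join, List.intercalate, String.toList_append]

lemma sjoin_one (s a : String) : PySem.Str.join s [a] = a := by
  rw [← String.toList_inj]
  simp [PySem.Str.join, PySem.Chars.join, List.intercalate]

-- every adjacency list has at least two entries
lemma adjGet_len (v : Int) (h0 : 0 ≤ v) (h1 : v < 17) : 2 ≤ (adjGet v).length := by
  interval_cases v <;> decide

-- a[1] on an explicit two-head list
lemma pyGetD_two_head (a b : Int) (u : List Int) :
    PySem.List.pyGetD (a :: b :: u) 1 0 = b := by
  rw [PySem.List.pyGetD_eq_getElem _ _ (by omega) (by simp)]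
  simp

-- one unfolding of A's neighbor recursion in the recursive (length > 2) case
lemma neighborA_step (ns : List Int) (k v : Int) (hy i j : String) (h : 2 ≤ ns.length) :
    genRecNeighborA (ns ++ [k]) v hy i j =
      "- assume HL: " ++ disjOf j ns ++
      ".\n  apply HL.\n" ++ indentS (genRecNeighborA ns v "HL" i j) ++ "\n" ++
      leafB "HR" k v i j := by
  conv_lhs => rw [genRecNeighborA]
  simp only [List.dropLast_concat, PySem.List.pyGet?_neg_one_append_singleton, Option.getD_some]
  rw [dif_pos (show 1 < ns.length by omega)]
  simp only [List.cons_append, List.nil_append]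
  rw [sjoin_cc, sjoin_cc, sjoin_cc, sjoin_cc, sjoin_cc, sjoin_one]
  rw [← String.toList_inj]
  simp [String.toList_append, leafB]

-- one unfolding of B's neighbor loop in the same case
lemma neighborB_step (ns : List Int) (k v : Int) (hy i j : String) (h : 2 ≤ ns.length) :
    genRecNeighborB (ns ++ [k]) v hy i j =
      "- assume HL: " ++ disjOf j ns ++
      ".\n  apply HL.\n" ++ indentS (genRecNeighborB ns v "HL" i j) ++ "\n" ++
      leafB "HR" k v i j := by
  obtain ⟨a, t, rfl⟩ : ∃ a t, ns = a :: t := by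
    cases ns with | nil => simp at h | cons a t => exact ⟨a, t, rfl⟩
  obtain ⟨b, u, rfl⟩ : ∃ b u, t = b :: u := by
    cases t with | nil => simp at h | cons b u => exact ⟨b, u, rfl⟩
  simp only [genRecNeighborB, PySem.List.len_eq]
  rw [show ((((a :: b :: u) ++ [k]).length : Nat) : Int) = (((a :: b :: u).length : Nat) : Int) + 1 by
    simp [List.length_append]]
  rw [PySem.List.pyRange_one_succ_right (by exact_mod_cast h)]
  rw [List.foldl_append]
  simp only [List.foldl_cons, List.foldl_nil]
  have hfold : ∀ init : String,
      List.foldl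
        (fun result idx =>
          "- assume HL: " ++ disjOf j (PySem.List.slice ((a :: b :: u) ++ [k]) none (some idx)) ++
          ".\n  apply HL.\n" ++ indentS result ++ "\n" ++
          leafB "HR" ((PySem.List.pyGet? ((a :: b :: u) ++ [k]) idx).getD 0) v i j)
        init (PySem.List.pyRange 2 ((a :: b :: u).length : Int)) =
      List.foldl
        (fun result idx =>
          "- assume HL: " ++ disjOf j (PySem.List.slice (a :: b :: u) none (some idx)) ++
          ".\n  apply HL.\n" ++ indentS result ++ "\n" ++
          leafB "HR" ((PySem.List.pyGet? (a :: b :: u) idx).getD 0) v i j)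
        init (PySem.List.pyRange 2 ((a :: b :: u).length : Int)) := by
    intro init
    apply PySem.List.foldl_congr_mem
    intro acc x hx
    rw [PySem.List.mem_pyRange_one] at hx
    rw [PySem.List.slice_to _ (by omega), PySem.List.slice_to _ (by omega),
        List.take_append_of_le_length (by omega),
        PySem.List.pyGet?_of_nonneg _ (by omega), PySem.List.pyGet?_of_nonneg _ (by omega),
        List.getElem?_append_left (by omega)]
  rw [hfold]
  rw [PySem.List.slice_to _ (by positivity)]
  simp only [Int.toNat_natCast]
  rw [List.take_left]
  rw [PySem.List.pyGet?_append_length]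
  simp only [Option.getD_some]
  rw [show ((a : Int) :: b :: u) ++ [k] = a :: b :: (u ++ [k]) from rfl]
  simp only [List.headD_cons]
  rw [pyGetD_two_head]
  try rw [pyGetD_two_head]
  try rfl

-- the two neighbor-step generators agree on lists of length ≥ 2
lemma neighbor_eq (v : Int) (i j : String) :
    ∀ ns : List Int, 2 ≤ ns.length → ∀ hy, genRecNeighborA ns v hy i j = genRecNeighborB ns v hy i j := by
  intro ns
  induction ns using List.reverseRecOn with
  | nil => intro hn; simp at hn
  | append_singleton ns k IH =>
    intro hn hy
    rcases Nat.lt_or_ge ns.length 2 with hlt | hge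
    · -- base: ns = [n0], the innermost two-element block
      have h1 : ns.length = 1 := by simp [List.length_append] at hn; omega
      obtain ⟨n0, rfl⟩ := List.length_eq_one_iff.mp h1
      conv_lhs => rw [genRecNeighborA]
      simp only [List.dropLast_concat, PySem.List.pyGet?_neg_one_append_singleton, Option.getD_some]
      rw [dif_neg (by simp)]
      simp only [List.headD_cons, List.cons_append, List.nil_append]
      simp only [disjOf, List.map_cons, List.map_nil]
      rw [sjoin_one]
      rw [sjoin_cc, sjoin_cc, sjoin_cc, sjoin_cc, sjoin_cc, sjoin_one]
      simp only [genRecNeighborB, PySem.List.len_eq]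
      rw [show (([n0, k].length : Nat) : Int) = (2 : Int) by simp]
      rw [show PySem.List.pyRange 2 2 = ([] : List Int) from rfl]
      simp only [List.foldl_nil, List.headD_cons]
      rw [pyGetD_two_head]
      rw [← String.toList_inj]
      simp [String.toList_append, leafB]
    · rw [neighborA_step ns k v hy i j hge, neighborB_step ns k v hy i j hge, IH hge "HL"]

-- the two case-body generators agree on vertices with ≥ 2 neighbors
lemma casebody_eq (v : Int) (hv : 2 ≤ (adjGet v).length) (hy i j : String) :
    genCaseBodyA v hy i j = genCaseBodyB v hy i j := by
  simp only [genCaseBodyA, genCaseBodyB]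
  rw [neighbor_eq v i j (adjGet v) hv "H_neighbors"]
  rw [sjoin_cc, sjoin_cc, sjoin_cc, sjoin_cc, sjoin_one]
  rw [← String.toList_inj]
  simp [String.toList_append]

-- one unfolding of A's vertex recursion in the recursive case
lemma vertexA_step (ns : List Int) (k : Int) (i j : String) (h : 2 ≤ ns.length) :
    gen_recursive_vertex_step (ns ++ [k]) i j =
      "- assume HL: " ++ genPartialDef ns i j ++
      ".\n" ++ "  apply HL.\n" ++ indentS (gen_recursive_vertex_step ns i j) ++
      "\n- assume HR: " ++ genVertexClause k i j ++ ".\n" ++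
      indentS (genCaseBodyA k "HR" i j) := by
  conv_lhs => rw [gen_recursive_vertex_step]
  simp only [List.dropLast_concat, PySem.List.pyGet?_neg_one_append_singleton, Option.getD_some]
  rw [dif_pos (show 1 < ns.length by omega)]
  simp only [List.cons_append, List.nil_append]
  rw [sjoin_cc, sjoin_cc, sjoin_cc, sjoin_cc, sjoin_one]
  rw [← String.toList_inj]
  simp [String.toList_append]

-- one unfolding of B's vertex loop in the same case
lemma vertexB_step (ns : List Int) (k : Int) (i j : String) (h : 2 ≤ ns.length) :
    gen_recursive_vertex_step_alt (ns ++ [k]) i j =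
      "- assume HL: " ++ genPartialDef ns i j ++
      ".\n" ++ "  apply HL.\n" ++ indentS (gen_recursive_vertex_step_alt ns i j) ++
      "\n- assume HR: " ++ genVertexClause k i j ++ ".\n" ++
      indentS (genCaseBodyB k "HR" i j) := by
  obtain ⟨a, t, rfl⟩ : ∃ a t, ns = a :: t := by
    cases ns with | nil => simp at h | cons a t => exact ⟨a, t, rfl⟩
  obtain ⟨b, u, rfl⟩ : ∃ b u, t = b :: u := by
    cases t with | nil => simp at h | cons b u => exact ⟨b, u, rfl⟩
  simp only [gen_recursive_vertex_step_alt, PySem.List.len_eq]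
  rw [show ((((a :: b :: u) ++ [k]).length : Nat) : Int) = (((a :: b :: u).length : Nat) : Int) + 1 by
    simp [List.length_append]]
  rw [PySem.List.pyRange_one_succ_right (by exact_mod_cast h)]
  rw [List.foldl_append]
  simp only [List.foldl_cons, List.foldl_nil]
  have hfold : ∀ init : String,
      List.foldl
        (fun result idx =>
          "- assume HL: " ++ genPartialDef (PySem.List.slice ((a :: b :: u) ++ [k]) none (some idx)) i j ++
          ".\n" ++ "  apply HL.\n" ++ indentS result ++
          "\n- assume HR: " ++ genVertexClause ((PySem.List.pyGet? ((a :: b :: u) ++ [k]) idx).getD 0) i j ++ ".\n" ++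
          indentS (genCaseBodyB ((PySem.List.pyGet? ((a :: b :: u) ++ [k]) idx).getD 0) "HR" i j))
        init (PySem.List.pyRange 2 ((a :: b :: u).length : Int)) =
      List.foldl
        (fun result idx =>
          "- assume HL: " ++ genPartialDef (PySem.List.slice (a :: b :: u) none (some idx)) i j ++
          ".\n" ++ "  apply HL.\n" ++ indentS result ++
          "\n- assume HR: " ++ genVertexClause ((PySem.List.pyGet? (a :: b :: u) idx).getD 0) i j ++ ".\n" ++
          indentS (genCaseBodyB ((PySem.List.pyGet? (a :: b :: u) idx).getD 0) "HR" i j))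
        init (PySem.List.pyRange 2 ((a :: b :: u).length : Int)) := by
    intro init
    apply PySem.List.foldl_congr_mem
    intro acc x hx
    rw [PySem.List.mem_pyRange_one] at hx
    rw [PySem.List.slice_to _ (by omega), PySem.List.slice_to _ (by omega),
        List.take_append_of_le_length (by omega),
        PySem.List.pyGet?_of_nonneg _ (by omega), PySem.List.pyGet?_of_nonneg _ (by omega),
        List.getElem?_append_left (by omega)]
  rw [hfold]
  rw [PySem.List.slice_to _ (by positivity)]
  simp only [Int.toNat_natCast]
  rw [List.take_left]
  rw [PySem.List.pyGet?_append_length]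
  simp only [Option.getD_some]
  rw [show ((a : Int) :: b :: u) ++ [k] = a :: b :: (u ++ [k]) from rfl]
  simp only [List.headD_cons]
  rw [pyGetD_two_head, pyGetD_two_head]

lemma vertex_eq (i j : String) :
    ∀ vs : List Int, 2 ≤ vs.length → (∀ v ∈ vs, 0 ≤ v ∧ v < 17) →
      gen_recursive_vertex_step vs i j = gen_recursive_vertex_step_alt vs i j := by
  intro vs
  induction vs using List.reverseRecOn with
  | nil => intro hn; simp at hn
  | append_singleton ns k IH =>
    intro hn hmem
    have hk := hmem k (by simp)
    have hck := casebody_eq k (adjGet_len k hk.1 hk.2) "HR" i j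
    rcases Nat.lt_or_ge ns.length 2 with hlt | hge
    · -- base: ns = [v0], the innermost two-vertex block
      have h1 : ns.length = 1 := by simp [List.length_append] at hn; omega
      obtain ⟨v0, rfl⟩ := List.length_eq_one_iff.mp h1
      have hv0 := hmem v0 (by simp)
      have hcv0 := casebody_eq v0 (adjGet_len v0 hv0.1 hv0.2) "HL" i j
      conv_lhs => rw [gen_recursive_vertex_step]
      simp only [List.dropLast_concat, PySem.List.pyGet?_neg_one_append_singleton, Option.getD_some]
      rw [dif_neg (by simp)]
      simp only [List.headD_cons, List.cons_append, List.nil_append]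
      simp only [genPartialDef, List.map_cons, List.map_nil]
      rw [sjoin_one]
      rw [sjoin_cc, sjoin_cc, sjoin_cc, sjoin_one]
      simp only [gen_recursive_vertex_step_alt, PySem.List.len_eq]
      rw [show (([v0, k].length : Nat) : Int) = (2 : Int) by simp]
      rw [show PySem.List.pyRange 2 2 = ([] : List Int) from rfl]
      simp only [List.foldl_nil, List.headD_cons]
      rw [pyGetD_two_head]
      rw [hcv0, hck]
      rw [← String.toList_inj]
      simp [String.toList_append]
    · rw [vertexA_step ns k i j hge, vertexB_step ns k i j hge,
          IH hge (fun v hv => hmem v (by simp [hv])), hck]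

-- ===== VERDICT (by name: the statement is the Claim_ definition above) =====
theorem gen_recursive_vertex_step_spec : Claim_equal_gen_recursive_vertex_step := by
  intro vertices i_var j_var _hdom hpre
  unfold Spec_gen_recursive_vertex_step
  exact vertex_eq i_var j_var vertices hpre.1 hpre.2
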